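-- pv_equiv track=rewrite | github.com/zak39/exercices-python | dictee-magique/dictee-magique.py | deleteCaractere
-- ===== SOURCE A (Python) =====
-- def deleteCaractere(texte_parse):
--     texte_parse = texte_parse.replace("."," ")
--     texte_parse = texte_parse.replace("'"," ")
--     texte_parse = texte_parse.replace(","," ")
--     texte_parse = texte_parse.replace('"',' ')
--     texte_parse = texte_parse.replace(':',' ')
--     texte_parse = texte_parse.replace(';',' ')
--     texte_parse = texte_parse.replace('(',' ')
--     texte_parse = texte_parse.replace(')',' ')
--
--     liste_parse = texte_parse.split()
--     liste_caractere = ["?","!"]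
--     liste_parse = [item for item in liste_parse if item not in liste_caractere]
--
--     return liste_parse
-- ===== SOURCE B (Python) =====
-- def deleteCaractere(texte_parse):
--     delims = {'.', "'", ',', '"', ':', ';', '(', ')'}
--     res = []
--     buf = []
--     for ch in texte_parse:
--         if ch in delims or ch.isspace():
--             if buf:
--                 tok = ''.join(buf)
--                 if tok != '?' and tok != '!':
--                     res.append(tok)
--                 buf = []
--         else:
--             buf.append(ch)
--     if buf:
--         tok = ''.join(buf)
--         if tok != '?' and tok != '!':
--             res.append(tok)
--     return res
-- ===== Notes on version B (the rewrite author's own statement) =====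
-- stated objective: faster
-- what changed: B tokenizes in one left-to-right scan with a current-token buffer (delimiters treated like whitespace, '?'/'!' filtered at flush), replacing A's eight full replace passes plus split plus a filter comprehension.
import Mathlib
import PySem

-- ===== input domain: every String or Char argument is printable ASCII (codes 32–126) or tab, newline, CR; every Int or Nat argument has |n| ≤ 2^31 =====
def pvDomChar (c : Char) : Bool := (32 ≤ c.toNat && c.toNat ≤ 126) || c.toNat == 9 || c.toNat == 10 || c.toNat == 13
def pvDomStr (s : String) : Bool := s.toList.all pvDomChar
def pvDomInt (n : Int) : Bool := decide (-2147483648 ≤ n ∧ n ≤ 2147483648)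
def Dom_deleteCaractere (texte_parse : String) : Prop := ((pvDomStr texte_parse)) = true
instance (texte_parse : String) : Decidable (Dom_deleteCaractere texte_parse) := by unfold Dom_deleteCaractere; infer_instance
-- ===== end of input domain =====

-- B replaces A's eight replace passes + split + filter comprehension by one single scan with a token buffer (same return value).

-- ===== PORT A =====
def deleteCaractere (texte_parse : String) : List String :=
  let t1 := PySem.Str.replace texte_parse "." " "
  let t2 := PySem.Str.replace t1 "'" " "
  let t3 := PySem.Str.replace t2 "," " "
  let t4 := PySem.Str.replace t3 "\"" " "
  let t5 := PySem.Str.replace t4 ":" " "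
  let t6 := PySem.Str.replace t5 ";" " "
  let t7 := PySem.Str.replace t6 "(" " "
  let t8 := PySem.Str.replace t7 ")" " "
  let liste_parse := PySem.Str.split₀ t8
  let liste_caractere : List String := ["?", "!"]
  liste_parse.filter (fun item => !(liste_caractere.contains item))

-- ===== PORT B =====
def pvDelims : List Char := ['.', '\'', ',', '"', ':', ';', '(', ')']

-- the '?'/'!'-filtered append of a finished token (Python's flush of buf into res)
def pvFlush (buf : List Char) (res : List String) : List String :=
  let tok := String.ofList buf
  if tok ≠ "?" ∧ tok ≠ "!" then res ++ [tok] else res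

-- the single left-to-right scan of Source B
def pvScan : List Char → List Char → List String → List String
  | [], buf, res => if buf.isEmpty then res else pvFlush buf res
  | c :: rest, buf, res =>
      if pvDelims.contains c || PySem.Chars.isspace c then
        if buf.isEmpty then pvScan rest [] res
        else pvScan rest [] (pvFlush buf res)
      else pvScan rest (buf ++ [c]) res

def deleteCaractere_alt (texte_parse : String) : List String :=
  pvScan texte_parse.toList [] []

-- ===== PRECONDITION & SPEC =====
def Spec_deleteCaractere (texte_parse : String) (out : List String) : Prop := out = deleteCaractere_alt texte_parse
instance (texte_parse : String) (out : List String) : Decidable (Spec_deleteCaractere texte_parse out) := by unfold Spec_deleteCaractere; infer_instance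

-- ===== CLAIM (what is proved, stated in full; the proofs are below) =====
def Claim_equal_deleteCaractere : Prop := ∀ (texte_parse : String), Dom_deleteCaractere texte_parse → Spec_deleteCaractere texte_parse (deleteCaractere texte_parse)

-- ===== LEMMAS AND PROOFS =====

-- single-character substitution performed by one replace pass
def pvRepChar (d c : Char) : Char := if c = d then ' ' else c

-- the combined substitution of all eight passes
def pvF (c : Char) : Char := if pvDelims.contains c then ' ' else c

-- the string-level filter A applies, used as the common normal form
def pvFiltS (ts : List (List Char)) : List String :=
  (ts.map String.ofList).filter (fun item => !((["?", "!"] : List String).contains item))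

lemma pvRep_go (d : Char) : ∀ (l acc : List Char) (fuel : Nat), l.length ≤ fuel →
    PySem.Chars.replace.go [d] [' '] fuel l acc = acc.reverse ++ l.map (pvRepChar d) := by
  intro l
  induction l with
  | nil => intro acc fuel _; cases fuel <;> simp [PySem.Chars.replace.go]
  | cons c t ih =>
      intro acc fuel hf
      cases fuel with
      | zero => simp at hf
      | succ f =>
          simp only [PySem.Chars.replace.go]
          by_cases hdc : d = c
          · subst hdc
            simp only [List.isPrefixOf, BEq.rfl, Bool.true_and, List.isPrefixOf_nil_left, if_true]
            have hdrop : List.drop [d].length (d :: t) = t := rfl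
            rw [hdrop, ih _ f (by simpa using hf)]
            simp [pvRepChar]
          · have : ([d].isPrefixOf (c :: t)) = false := by
              simp [List.isPrefixOf, hdc]
            rw [this]
            simp only [Bool.false_eq_true, if_false]
            rw [ih _ f (by simpa using hf)]
            simp [pvRepChar, Ne.symm hdc]

lemma pvRep_single (d : Char) (cs : List Char) :
    PySem.Chars.replace cs [d] [' '] = cs.map (pvRepChar d) := by
  have h := pvRep_go d cs [] cs.length le_rfl
  simpa [PySem.Chars.replace] using h

lemma pvComp_char (c : Char) :
    pvRepChar ')' (pvRepChar '(' (pvRepChar ';' (pvRepChar ':' (pvRepChar '"' (pvRepChar ','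
      (pvRepChar '\'' (pvRepChar '.' c))))))) = pvF c := by
  by_cases h1 : c = '.'; · subst h1; decide
  by_cases h2 : c = '\''; · subst h2; decide
  by_cases h3 : c = ','; · subst h3; decide
  by_cases h4 : c = '"'; · subst h4; decide
  by_cases h5 : c = ':'; · subst h5; decide
  by_cases h6 : c = ';'; · subst h6; decide
  by_cases h7 : c = '('; · subst h7; decide
  by_cases h8 : c = ')'; · subst h8; decide
  simp [pvRepChar, pvF, pvDelims, h1, h2, h3, h4, h5, h6, h7, h8]

lemma pvScan_append (l : List Char) : ∀ (buf : List Char) (res : List String),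
    pvScan l buf res = res ++ pvScan l buf [] := by
  induction l with
  | nil =>
      intro buf res
      simp only [pvScan]
      by_cases h : buf.isEmpty <;> simp [h, pvFlush] <;> split_ifs <;> simp
  | cons c rest ih =>
      intro buf res
      simp only [pvScan]
      by_cases hc : (pvDelims.contains c || PySem.Chars.isspace c) = true
      · simp only [hc, if_true]
        by_cases hb : buf.isEmpty
        · simp only [hb, if_true]; exact ih [] res
        · simp only [hb, Bool.false_eq_true, if_false]
          rw [ih [] (pvFlush buf res), ih [] (pvFlush buf [])]
          simp [pvFlush]
          split_ifs <;> simp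
      · simp only [Bool.not_eq_true] at hc
        simp only [hc, Bool.false_eq_true, if_false]
        exact ih (buf ++ [c]) res

lemma pvSplitGo_append (l : List Char) : ∀ (cur : List Char) (acc : List (List Char)),
    PySem.Chars.split₀.go l cur acc = acc.reverse ++ PySem.Chars.split₀.go l cur [] := by
  induction l with
  | nil =>
      intro cur acc
      simp only [PySem.Chars.split₀.go]
      by_cases h : cur.isEmpty <;> simp [h]
  | cons c rest ih =>
      intro cur acc
      simp only [PySem.Chars.split₀.go]
      by_cases hs : PySem.Chars.isspace c
      · simp only [hs, if_true]
        by_cases hcur : cur.isEmpty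
        · simp only [hcur, if_true]; exact ih [] acc
        · simp only [hcur, Bool.false_eq_true, if_false]
          rw [ih [] (cur.reverse :: acc), ih [] [cur.reverse]]
          simp
      · simp only [hs, Bool.false_eq_true, if_false]
        exact ih (c :: cur) acc

lemma pvFlush_eq (buf : List Char) : pvFlush buf [] = pvFiltS [buf] := by
  by_cases hq : String.ofList buf = "?"
  · simp [pvFlush, pvFiltS, hq]
  · by_cases hb : String.ofList buf = "!"
    · simp [pvFlush, pvFiltS, hq, hb]
    · simp [pvFlush, pvFiltS, hq, hb]

lemma pvFiltS_append (ts us : List (List Char)) :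
    pvFiltS (ts ++ us) = pvFiltS ts ++ pvFiltS us := by
  simp [pvFiltS]

lemma pvMain (cs : List Char) : ∀ (buf : List Char),
    pvScan cs buf [] = pvFiltS (PySem.Chars.split₀.go (cs.map pvF) buf.reverse []) := by
  induction cs with
  | nil =>
      intro buf
      simp only [pvScan, List.map, PySem.Chars.split₀.go, List.isEmpty_reverse, List.reverse_reverse]
      by_cases hb : buf.isEmpty
      · simp [hb, pvFiltS]
      · simp only [hb, Bool.false_eq_true, if_false]
        rw [pvFlush_eq]
        rfl
  | cons c rest ih =>
      intro buf
      simp only [pvScan, List.map]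
      by_cases hc : (pvDelims.contains c || PySem.Chars.isspace c) = true
      · have hspace : PySem.Chars.isspace (pvF c) = true := by
          by_cases hd : pvDelims.contains c = true
          · have h1 : pvF c = ' ' := by unfold pvF; rw [hd]; simp
            rw [h1]; decide
          · have h2 : pvDelims.contains c = false := by simpa using hd
            have h3 : PySem.Chars.isspace c = true := by
              have hc' := hc
              rw [Bool.or_eq_true] at hc'
              rcases hc' with h | h
              · exact absurd h hd
              · exact h
            have h1 : pvF c = c := by unfold pvF; rw [h2]; simp
            rw [h1]; exact h3
        simp only [hc, if_true]
        simp only [PySem.Chars.split₀.go, hspace, if_true, List.isEmpty_reverse]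
        by_cases hb : buf.isEmpty
        · simp only [hb, if_true]
          have := ih []
          simpa using this
        · simp only [hb, Bool.false_eq_true, if_false, List.reverse_reverse]
          rw [pvScan_append, pvSplitGo_append]
          have := ih []
          simp only [List.reverse_nil] at this
          rw [this, pvFiltS_append, pvFlush_eq]
          rfl
      · simp only [Bool.not_eq_true] at hc
        have hdelim : pvDelims.contains c = false := (Bool.or_eq_false_iff.mp hc).1
        have hspace : PySem.Chars.isspace c = false := (Bool.or_eq_false_iff.mp hc).2
        have hfc : pvF c = c := by unfold pvF; rw [hdelim]; simp
        simp only [hc, Bool.false_eq_true, if_false, hfc]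
        simp only [PySem.Chars.split₀.go, hspace, Bool.false_eq_true, if_false]
        have : c :: buf.reverse = (buf ++ [c]).reverse := by simp
        rw [this]
        exact ih (buf ++ [c])

lemma pvEight (cs : List Char) :
    ((((((((cs.map (pvRepChar '.')).map (pvRepChar '\'')).map (pvRepChar ',')).map
      (pvRepChar '"')).map (pvRepChar ':')).map (pvRepChar ';')).map
      (pvRepChar '(')).map (pvRepChar ')')) = cs.map pvF := by
  induction cs with
  | nil => rfl
  | cons a l ih =>
      simp only [List.map_cons]
      rw [ih, pvComp_char a]

lemma pvSplitStr (s : String) :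
    (PySem.Str.split₀ s).filter (fun item => !((["?", "!"] : List String).contains item)) =
      pvFiltS (PySem.Chars.split₀ s.toList) := by
  have h := PySem.Str.split₀_map_toList s
  rw [pvFiltS, ← h, List.map_map]
  have hmk : (String.ofList ∘ String.toList) = id := by
    funext t
    exact String.ofList_toList
  rw [hmk, List.map_id]

-- ===== VERDICT (by name: the statement is the Claim_ definition above) =====
theorem deleteCaractere_spec : Claim_equal_deleteCaractere := by
  intro t _
  show deleteCaractere t = deleteCaractere_alt t
  have htl : (PySem.Str.replace (PySem.Str.replace (PySem.Str.replace (PySem.Str.replace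
      (PySem.Str.replace (PySem.Str.replace (PySem.Str.replace (PySem.Str.replace t "." " ")
      "'" " ") "," " ") "\"" " ") ":" " ") ";" " ") "(" " ") ")" " ").toList
      = t.toList.map pvF := by
    simp only [PySem.Str.toList_replace]
    rw [show (".".toList) = ['.'] from rfl, show ("'".toList) = ['\''] from rfl,
        show (",".toList) = [','] from rfl, show ("\"".toList) = ['"'] from rfl,
        show (":".toList) = [':'] from rfl, show (";".toList) = [';'] from rfl,
        show ("(".toList) = ['('] from rfl, show (")".toList) = [')'] from rfl,
        show (" ".toList) = [' '] from rfl]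
    rw [pvRep_single, pvRep_single, pvRep_single, pvRep_single, pvRep_single,
        pvRep_single, pvRep_single, pvRep_single]
    exact pvEight t.toList
  simp only [deleteCaractere, deleteCaractere_alt]
  rw [pvSplitStr, htl]
  simp only [PySem.Chars.split₀]
  have h := pvMain t.toList []
  simp only [List.reverse_nil] at h
  exact h.symm
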